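-- pv_equiv track=rewrite | github.com/CIeNET-International/aotc | aotc/workload_utils.py | profile_ranks_staggered
-- ===== SOURCE A (Python) =====
-- def profile_ranks_staggered(num_nodes: int, num_all: int = 2):
--   gpus_per_node = 8
--   ranks = []
--   for node_idx in range(num_nodes):
--     offset = node_idx * gpus_per_node
--     if node_idx < num_all:
--       ranks += [i + offset for i in range(gpus_per_node)]
--     else:
--       ranks += [offset]
--   return ranks
-- ===== SOURCE B (Python) =====
-- def profile_ranks_staggered(num_nodes: int, num_all: int = 2):
--   gpus_per_node = 8
--   full = num_nodes if num_nodes < num_all else num_all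
--   if full < 0:
--     full = 0
--   cut = gpus_per_node * full
--   total = cut + (num_nodes - full if full < num_nodes else 0)
--   return [j if j < cut else (j - cut + full) * gpus_per_node for j in range(total)]
-- ===== Notes on version B (the rewrite author's own statement) =====
-- stated objective: alternative
-- what changed: Instead of iterating over nodes and appending each node's block, B computes the output length in closed form and maps each output POSITION j directly to its rank value (identity below the cut, (j-cut+full)*8 above it), eliminating the per-node loop and repeated list concatenation.
import Mathlib
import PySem

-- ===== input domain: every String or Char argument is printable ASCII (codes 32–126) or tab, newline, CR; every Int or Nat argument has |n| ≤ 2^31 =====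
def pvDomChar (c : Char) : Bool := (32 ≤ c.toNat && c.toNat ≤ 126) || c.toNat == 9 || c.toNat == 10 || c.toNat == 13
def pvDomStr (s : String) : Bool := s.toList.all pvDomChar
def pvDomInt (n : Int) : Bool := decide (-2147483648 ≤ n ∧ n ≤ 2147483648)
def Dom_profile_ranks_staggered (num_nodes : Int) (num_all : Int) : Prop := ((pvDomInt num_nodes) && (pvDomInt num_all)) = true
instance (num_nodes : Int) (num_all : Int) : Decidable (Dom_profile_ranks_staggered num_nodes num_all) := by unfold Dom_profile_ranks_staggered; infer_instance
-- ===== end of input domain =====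

-- B drops A's per-node append loop: it computes the output length in closed form and
-- maps each output position directly to its rank value (objective: alternative algorithm).

-- ===== PORT A =====
def profile_ranks_staggered (num_nodes : Int) (num_all : Int) : List Int :=
  (PySem.List.pyRange 0 num_nodes 1).foldl
    (fun ranks node_idx =>
      let offset := node_idx * 8
      if node_idx < num_all then
        ranks ++ (PySem.List.pyRange 0 8 1).map (fun i => i + offset)
      else
        ranks ++ [offset])
    []

-- ===== PORT B =====
def profile_ranks_staggered_alt (num_nodes : Int) (num_all : Int) : List Int :=
  let full0 := if num_nodes < num_all then num_nodes else num_all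
  let full := if full0 < 0 then 0 else full0
  let cut := 8 * full
  let total := cut + (if full < num_nodes then num_nodes - full else 0)
  (PySem.List.pyRange 0 total 1).map
    (fun j => if j < cut then j else (j - cut + full) * 8)

-- ===== PRECONDITION & SPEC =====
def Spec_profile_ranks_staggered (num_nodes : Int) (num_all : Int) (out : List Int) : Prop := out = profile_ranks_staggered_alt num_nodes num_all
instance (num_nodes : Int) (num_all : Int) (out : List Int) : Decidable (Spec_profile_ranks_staggered num_nodes num_all out) := by unfold Spec_profile_ranks_staggered; infer_instance

-- ===== CLAIM (what is proved, stated in full; the proofs are below) =====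
def Claim_equal_profile_ranks_staggered : Prop := ∀ (num_nodes : Int) (num_all : Int), Dom_profile_ranks_staggered num_nodes num_all → Spec_profile_ranks_staggered num_nodes num_all (profile_ranks_staggered num_nodes num_all)

-- ===== LEMMAS AND PROOFS =====

-- one full node's block is a contiguous range of 8
lemma block8 (c : Int) :
    (PySem.List.pyRange 0 8 1).map (fun i => i + c * 8) =
      PySem.List.pyRange (c * 8) (c * 8 + 8) 1 := by
  simp [PySem.List.pyRange_one]
  intro a _
  ring

-- A's branched fold equals a contiguous prefix plus a staggered tail
lemma a_shape (n : Nat) (na : Int) :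
    (PySem.List.pyRange 0 (n : Int) 1).flatMap
      (fun node_idx =>
        if node_idx < na then (PySem.List.pyRange 0 8 1).map (fun i => i + node_idx * 8)
        else [node_idx * 8]) =
      PySem.List.pyRange 0 (8 * max 0 (min (n : Int) na)) 1 ++
        (PySem.List.pyRange (max 0 (min (n : Int) na)) (n : Int) 1).map (fun i => i * 8) := by
  induction n with
  | zero =>
      simp only [Nat.cast_zero]
      have hf : max 0 (min (0:Int) na) = 0 := by omega
      rw [hf]
      simp [PySem.List.pyRange_one_eq_nil (le_refl (0:Int))]
  | succ n ih =>
      have hcast : ((n + 1 : Nat) : Int) = (n : Int) + 1 := by push_cast; ring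
      rw [hcast, PySem.List.pyRange_one_succ_right (by positivity), List.flatMap_append, ih]
      by_cases h : (n : Int) < na
      · have hf : max 0 (min ((n : Int)) na) = (n : Int) := by omega
        have hf' : max 0 (min ((n : Int) + 1) na) = (n : Int) + 1 := by omega
        rw [hf, hf']
        rw [PySem.List.pyRange_one_eq_nil (le_refl _),
            PySem.List.pyRange_one_eq_nil (le_refl _)]
        simp [h, block8]
        rw [show (8:Int) * ((n:Int) + 1) = (n:Int) * 8 + 8 by ring,
            PySem.List.pyRange_one_append 0 ((n:Int) * 8) ((n:Int) * 8 + 8)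
              (by positivity) (by omega),
            show (8:Int) * (n:Int) = (n:Int) * 8 by ring]
      · have hf : max 0 (min ((n : Int) + 1) na) = max 0 (min ((n : Int)) na) := by omega
        have hle : max 0 (min ((n : Int)) na) ≤ (n : Int) := by omega
        rw [hf, PySem.List.pyRange_one_succ_right hle]
        simp [h]

-- B's positional map equals the same prefix-plus-tail shape
lemma b_shape (nn na : Int) :
    profile_ranks_staggered_alt nn na =
      PySem.List.pyRange 0 (8 * max 0 (min nn na)) 1 ++
        (PySem.List.pyRange (max 0 (min nn na)) nn 1).map (fun i => i * 8) := by
  unfold profile_ranks_staggered_alt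
  have hfull : (if (if nn < na then nn else na) < 0 then 0 else (if nn < na then nn else na))
      = max 0 (min nn na) := by
    split <;> split <;> omega
  simp only [hfull]
  set f := max 0 (min nn na) with hf
  have hf0 : 0 ≤ f := by omega
  have hid : ∀ c : Int, (PySem.List.pyRange 0 c 1).map
      (fun j => if j < c then j else (j - c + f) * 8) = PySem.List.pyRange 0 c 1 := by
    intro c
    conv_rhs => rw [← List.map_id (PySem.List.pyRange 0 c 1)]
    apply List.map_congr_left
    intro j hj
    rw [PySem.List.mem_pyRange_one] at hj
    simp [hj.2]
  by_cases h : f < nn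
  · simp only [if_pos h]
    rw [PySem.List.pyRange_one_append 0 (8 * f) (8 * f + (nn - f)) (by omega) (by omega),
        List.map_append, hid (8 * f)]
    congr 1
    simp only [PySem.List.pyRange_one]
    rw [List.map_map, List.map_map,
        show 8 * f + (nn - f) - 8 * f = nn - f by ring]
    apply List.map_congr_left
    intro k _
    simp only [Function.comp_apply]
    have hk : ¬ (8 * f + (k : Int) < 8 * f) := by omega
    rw [if_neg hk]
    ring
  · simp only [if_neg h]
    rw [PySem.List.pyRange_one_eq_nil (show nn ≤ f by omega)]
    simp only [List.map_nil, List.append_nil, add_zero]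
    exact hid (8 * f)

-- ===== VERDICT (by name: the statement is the Claim_ definition above) =====
theorem profile_ranks_staggered_spec : Claim_equal_profile_ranks_staggered := by
  intro nn na _
  unfold Spec_profile_ranks_staggered
  rw [b_shape]
  simp only [profile_ranks_staggered]
  have hfun : (fun (ranks : List Int) node_idx =>
      if node_idx < na then ranks ++ (PySem.List.pyRange 0 8 1).map (fun i => i + node_idx * 8)
      else ranks ++ [node_idx * 8]) =
      (fun (ranks : List Int) node_idx => ranks ++
        (if node_idx < na then (PySem.List.pyRange 0 8 1).map (fun i => i + node_idx * 8)
         else [node_idx * 8])) := by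
    funext ranks node_idx
    split <;> rfl
  rw [hfun, PySem.List.foldl_append_eq_flatMap, List.nil_append]
  by_cases h : 0 ≤ nn
  · obtain ⟨n, rfl⟩ := Int.eq_ofNat_of_zero_le h
    exact a_shape n na
  · have hf : max 0 (min nn na) = 0 := by omega
    rw [hf]
    simp [PySem.List.pyRange_one_eq_nil (show nn ≤ (0:Int) by omega),
          PySem.List.pyRange_one_eq_nil (le_refl (0:Int))]
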